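-- pv_equiv track=rewrite | github.com/Jooh34/algorithm | programmers/12981.py | solution
-- ===== SOURCE A (Python) =====
-- def solution(n, words):
--     last = ''
--     s = set()
--     for i,word in enumerate(words):
--         if last != '' and (last != word[0] or (word in s)):
--             # wrong
--             return [i%n+1, i//n+1]
--
--         s.add(word)
--         last = word[len(word)-1]
--
--     return [0,0]
-- ===== SOURCE B (Python) =====
-- def solution(n, words):
--     m = len(words)
--     # first chain-break index (evaluated lazily, stops at the first hit)
--     brk = next((i for i in range(1, m) if words[i][0] != words[i - 1][-1]), None)
--     # first duplicate index
--     seen = set()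
--     dup = None
--     for i, w in enumerate(words):
--         if w in seen:
--             dup = i
--             break
--         seen.add(w)
--     if brk is None and dup is None:
--         return [0, 0]
--     if brk is None:
--         idx = dup
--     elif dup is None:
--         idx = brk
--     else:
--         idx = min(brk, dup)
--     return [idx % n + 1, idx // n + 1]
-- ===== Notes on version B (the rewrite author's own statement) =====
-- stated objective: alternative
-- what changed: Replaces A's single joint-condition scan (carrying last-char and seen-set together and returning at the first violation) by two independent scans - earliest chain-break index and earliest duplicate index - combined by taking the minimum at the end.
-- outside the precondition, e.g. on solution(0, ['ab', 'bc']): A returns [0, 0], B returns [0, 0]; on solution(3, ['ab', 'ca', '']): A returns [2, 1], B returns [2, 1]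
import Mathlib
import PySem

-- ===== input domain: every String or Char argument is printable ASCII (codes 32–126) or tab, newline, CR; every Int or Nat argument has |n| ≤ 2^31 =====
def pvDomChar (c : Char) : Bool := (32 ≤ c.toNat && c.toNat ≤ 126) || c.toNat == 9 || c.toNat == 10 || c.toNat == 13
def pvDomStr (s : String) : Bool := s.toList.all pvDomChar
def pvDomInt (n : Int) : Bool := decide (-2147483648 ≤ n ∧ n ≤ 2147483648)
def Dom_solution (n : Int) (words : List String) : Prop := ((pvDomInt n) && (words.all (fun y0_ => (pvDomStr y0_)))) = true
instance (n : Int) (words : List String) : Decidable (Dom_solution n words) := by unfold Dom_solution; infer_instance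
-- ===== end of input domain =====

-- B replaces A's single joint-condition scan by two independent scans (earliest
-- chain break, earliest duplicate) combined by min at the end; alternative
-- decomposition, same cost. Pre_ excludes n = 0 and empty-string words (A raises
-- ZeroDivisionError / IndexError when it reaches them); see the note at Pre_solution.


-- ===== PORT A =====
-- the for-loop with early return; state: index i, last (Python string), seen set s
def solutionLoopA (n : Int) : List String → Int → String → PySem.Set String → List Int
  | [], _, _, _ => [0, 0]
  | w :: rest, i, last, s =>
    match (if last = "" then some false
           else match PySem.Str.pyGet? w 0 with
                | none => none              -- IndexError on word[0] (empty word), excluded by Pre_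
                | some c0 => some (last != String.ofList [c0] || PySem.Set.contains s w)) with
    | none => []
    | some true => [PySem.Int.mod i n + 1, PySem.Int.floordiv i n + 1]
    | some false =>
      match PySem.Str.pyGet? w (PySem.Str.len w - 1) with
      | none => []                          -- IndexError on word[len(word)-1], excluded by Pre_
      | some c => solutionLoopA n rest (i + 1) (String.ofList [c]) (PySem.Set.add s w)

def solution (n : Int) (words : List String) : List Int :=
  solutionLoopA n words 0 "" PySem.Set.empty

-- ===== PORT B =====
-- first i in [1, len) with words[i][0] != words[i-1][-1] (lazy: stops at the first hit)
def brkScanB : List String → Int → Option Int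
  | w1 :: w2 :: rest, i =>
    if PySem.Str.pyGet? w2 0 != PySem.Str.pyGet? w1 (-1) then some i
    else brkScanB (w2 :: rest) (i + 1)
  | _, _ => none

-- first i with words[i] already in the seen set
def dupScanB : List String → PySem.Set String → Int → Option Int
  | [], _, _ => none
  | w :: rest, seen, i =>
    if PySem.Set.contains seen w then some i
    else dupScanB rest (PySem.Set.add seen w) (i + 1)

-- the None-aware min of the two candidate indices
def minIdxB : Option Int → Option Int → Option Int
  | none, d => d
  | some b, none => some b
  | some b, some d => some (min b d)

def solution_alt (n : Int) (words : List String) : List Int :=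
  match minIdxB (brkScanB words 1) (dupScanB words PySem.Set.empty 0) with
  | none => [0, 0]
  | some idx => [PySem.Int.mod idx n + 1, PySem.Int.floordiv idx n + 1]

-- ===== PRECONDITION & SPEC =====
-- Pre_ excludes n = 0 and empty-string words, on which A raises (ZeroDivisionError at a
-- violation, IndexError when the empty word is reached); the exclusion is slightly wider
-- than A's raise set: A still returns [0,0] for n = 0 on a valid chain, and still returns
-- when the empty word lies after the first violation (see claim.json cites).
def Pre_solution (n : Int) (words : List String) : Prop :=
  n ≠ 0 ∧ ∀ w ∈ words, w ≠ ""
instance (n : Int) (words : List String) : Decidable (Pre_solution n words) := by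
  unfold Pre_solution; infer_instance

def pvWitness_solution : Int × List String := (3, ["ab", "bc", "ca"])

def Spec_solution (n : Int) (words : List String) (out : List Int) : Prop := out = solution_alt n words
instance (n : Int) (words : List String) (out : List Int) : Decidable (Spec_solution n words out) := by unfold Spec_solution; infer_instance

-- ===== CLAIM (what is proved, stated in full; the proofs are below) =====
def Claim_equal_solution : Prop := ∀ (n : Int) (words : List String), Dom_solution n words → Pre_solution n words → Spec_solution n words (solution n words)


-- ===== LEMMAS AND PROOFS =====

theorem str_toList_ne_nil (w : String) (h : w ≠ "") : w.toList ≠ [] := by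
  intro hl; exact h (by cases w with | _ l => simp at hl; simp [hl])

theorem ofList_singleton_ne_empty (c : Char) : String.ofList [c] ≠ "" := by
  intro h
  have := congrArg String.toList h
  simp at this

theorem str_exists_head (w : String) (h : w.toList ≠ []) : ∃ c, PySem.Str.pyGet? w 0 = some c := by
  have h0 : PySem.Str.pyGet? w 0 = w.toList[(0:Nat)]? := by
    exact_mod_cast PySem.Str.pyGet?_natCast w 0
  rw [h0]
  cases hw : w.toList with
  | nil => exact absurd hw h
  | cons a l => exact ⟨a, by simp⟩

theorem str_exists_last (w : String) (h : w.toList ≠ []) : ∃ c, PySem.Str.pyGet? w (-1) = some c := by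
  have h1 : PySem.Str.pyGet? w (-1) = w.toList.getLast? := by
    rw [show PySem.Str.pyGet? w (-1) = PySem.List.pyGet? w.toList (-1) from rfl,
      PySem.List.pyGet?_neg_one]
  rw [h1]
  exact ⟨w.toList.getLast h, List.getLast?_eq_some_getLast h⟩

theorem str_last_eq (w : String) (h : w.toList ≠ []) :
    PySem.Str.pyGet? w (PySem.Str.len w - 1) = PySem.Str.pyGet? w (-1) := by
  have h1 : PySem.Str.pyGet? w (-1) = w.toList.getLast? := by
    rw [show PySem.Str.pyGet? w (-1) = PySem.List.pyGet? w.toList (-1) from rfl,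
      PySem.List.pyGet?_neg_one]
  have hlen := List.length_pos_iff.mpr h
  have h2 : PySem.Str.pyGet? w (PySem.Str.len w - 1)
      = w.toList[((w.toList.length : Int) - 1).toNat]? := by
    rw [show PySem.Str.pyGet? w (PySem.Str.len w - 1)
        = PySem.List.pyGet? w.toList ((w.toList.length : Int) - 1) from rfl]
    exact PySem.List.pyGet?_of_nonneg _ (by omega)
  rw [h1, h2, List.getLast?_eq_getElem?]
  congr 1
  omega

-- proof-side reshaping of B's pair scan: break scan from a carried previous-last-char
def brkFrom (c : Char) : List String → Int → Option Int
  | [], _ => none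
  | w :: rest, i =>
    if PySem.Str.pyGet? w 0 != some c then some i
    else match PySem.Str.pyGet? w (-1) with
         | some c' => brkFrom c' rest (i + 1)
         | none => none

theorem brkScanB_eq_brkFrom (rest : List String) :
    ∀ (w : String) (i : Int) (c : Char), PySem.Str.pyGet? w (-1) = some c →
    (∀ x ∈ rest, x ≠ "") → brkScanB (w :: rest) i = brkFrom c rest i := by
  induction rest with
  | nil => intro w i c _ _; rfl
  | cons w2 rs ih =>
    intro w i c hc hne
    obtain ⟨c2, hc2⟩ := str_exists_last w2 (str_toList_ne_nil w2 (hne w2 (by simp)))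
    rw [show brkScanB (w :: w2 :: rs) i
        = if PySem.Str.pyGet? w2 0 != PySem.Str.pyGet? w (-1) then some i
          else brkScanB (w2 :: rs) (i + 1) from rfl,
      show brkFrom c (w2 :: rs) i
        = if PySem.Str.pyGet? w2 0 != some c then some i
          else match PySem.Str.pyGet? w2 (-1) with
               | some c' => brkFrom c' rs (i + 1)
               | none => none from rfl,
      hc, hc2]
    split
    · rfl
    · exact ih w2 (i + 1) c2 hc2 (fun x hx => hne x (by simp [hx]))

theorem dupScanB_ge (ws : List String) : ∀ (s : PySem.Set String) (i j : Int),
    dupScanB ws s i = some j → i ≤ j := by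
  induction ws with
  | nil => intro s i j h; simp [dupScanB] at h
  | cons w rest ih =>
    intro s i j h
    rw [show dupScanB (w :: rest) s i
        = if PySem.Set.contains s w then some i
          else dupScanB rest (PySem.Set.add s w) (i + 1) from rfl] at h
    split at h
    · cases h; omega
    · have := ih (PySem.Set.add s w) (i + 1) j h; omega

theorem brkFrom_ge (ws : List String) : ∀ (c : Char) (i j : Int),
    brkFrom c ws i = some j → i ≤ j := by
  induction ws with
  | nil => intro c i j h; simp [brkFrom] at h
  | cons w rest ih =>
    intro c i j h
    rw [show brkFrom c (w :: rest) i
        = if PySem.Str.pyGet? w 0 != some c then some i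
          else match PySem.Str.pyGet? w (-1) with
               | some c' => brkFrom c' rest (i + 1)
               | none => none from rfl] at h
    split at h
    · cases h; omega
    · cases hg : PySem.Str.pyGet? w (-1) with
      | none => rw [hg] at h; simp at h
      | some c' =>
        rw [hg] at h
        have := ih c' (i + 1) j h; omega

theorem loopA_eq (n : Int) (ws : List String) : ∀ (i : Int) (c : Char) (s : PySem.Set String),
    (∀ w ∈ ws, w ≠ "") →
    solutionLoopA n ws i (String.ofList [c]) s =
      match minIdxB (brkFrom c ws i) (dupScanB ws s i) with
      | none => [0, 0]
      | some idx => [PySem.Int.mod idx n + 1, PySem.Int.floordiv idx n + 1] := by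
  induction ws with
  | nil => intro i c s _; rfl
  | cons w rest ih =>
    intro i c s h
    have hw : w ≠ "" := h w (by simp)
    have hwl : w.toList ≠ [] := str_toList_ne_nil w hw
    obtain ⟨c0, hc0⟩ := str_exists_head w hwl
    obtain ⟨c', hc'⟩ := str_exists_last w hwl
    have hrest : ∀ x ∈ rest, x ≠ "" := fun x hx => h x (by simp [hx])
    have hstep : solutionLoopA n (w :: rest) i (String.ofList [c]) s
        = if (String.ofList [c] != String.ofList [c0] || PySem.Set.contains s w) then
            [PySem.Int.mod i n + 1, PySem.Int.floordiv i n + 1]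
          else match PySem.Str.pyGet? w (PySem.Str.len w - 1) with
               | none => []
               | some cl => solutionLoopA n rest (i + 1) (String.ofList [cl]) (PySem.Set.add s w) := by
      rw [solutionLoopA, if_neg (ofList_singleton_ne_empty c), hc0]
      cases hb : (String.ofList [c] != String.ofList [c0] || PySem.Set.contains s w) <;>
        simp only [hb] <;> rfl
    have hB : brkFrom c (w :: rest) i
        = if (some c0 != some c) then some i else brkFrom c' rest (i + 1) := by
      rw [brkFrom, hc0, hc']
    have hD : dupScanB (w :: rest) s i
        = if PySem.Set.contains s w then some i
          else dupScanB rest (PySem.Set.add s w) (i + 1) := rfl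
    rw [hstep, hB, hD]
    by_cases hcc : c0 = c
    · subst hcc
      have h1 : (String.ofList [c0] != String.ofList [c0]) = false := by simp
      have h2 : (some c0 != some c0) = false := by simp
      rw [h1, h2]
      simp only [Bool.false_or, Bool.false_eq_true, if_false]
      by_cases hmem : PySem.Set.contains s w = true
      · rw [hmem]
        simp only [if_true]
        cases hbr : brkFrom c' rest (i + 1) with
        | none => rfl
        | some j =>
          have hj := brkFrom_ge rest c' (i + 1) j hbr
          have hmin : minIdxB (some j) (some i) = some i := by
            show some (min j i) = some i
            congr 1; omega
          rw [hmin]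
      · rw [Bool.not_eq_true] at hmem
        rw [hmem]
        simp only [Bool.false_eq_true, if_false]
        rw [str_last_eq w hwl, hc']
        exact ih (i + 1) c' (PySem.Set.add s w) hrest
    · have h1 : (String.ofList [c] != String.ofList [c0]) = true := by
        simp only [bne_iff_ne, ne_eq]
        intro hh
        have := congrArg String.toList hh
        simp at this
        exact hcc this.symm
      have h2 : (some c0 != some c) = true := by
        simp only [bne_iff_ne, ne_eq, Option.some.injEq]
        exact hcc
      rw [h1, h2]
      simp only [Bool.true_or, if_true]
      by_cases hmem : PySem.Set.contains s w = true
      · rw [hmem]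
        simp only [if_true]
        have hmin : minIdxB (some i) (some i) = some i := by
          show some (min i i) = some i
          simp
        rw [hmin]
      · rw [Bool.not_eq_true] at hmem
        rw [hmem]
        simp only [Bool.false_eq_true, if_false]
        cases hdp : dupScanB rest (PySem.Set.add s w) (i + 1) with
        | none => rfl
        | some j =>
          have hj := dupScanB_ge rest (PySem.Set.add s w) (i + 1) j hdp
          have hmin : minIdxB (some i) (some j) = some i := by
            show some (min i j) = some i
            congr 1; omega
          rw [hmin]

-- ===== VERDICT (by name: the statement is the Claim_ definition above) =====
theorem solution_spec : Claim_equal_solution := by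
  intro n words _ hpre
  obtain ⟨-, hne⟩ := hpre
  unfold Spec_solution
  cases words with
  | nil => rfl
  | cons w rest =>
    have hw : w ≠ "" := hne w (by simp)
    have hwl : w.toList ≠ [] := str_toList_ne_nil w hw
    obtain ⟨c', hc'⟩ := str_exists_last w hwl
    have hrest : ∀ x ∈ rest, x ≠ "" := fun x hx => hne x (by simp [hx])
    have hL : solution n (w :: rest)
        = solutionLoopA n rest 1 (String.ofList [c']) (PySem.Set.add PySem.Set.empty w) := by
      rw [solution, solutionLoopA, if_pos rfl, str_last_eq w hwl, hc']
      rfl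
    have hR : solution_alt n (w :: rest)
        = match minIdxB (brkFrom c' rest 1)
            (dupScanB rest (PySem.Set.add PySem.Set.empty w) 1) with
          | none => [0, 0]
          | some idx => [PySem.Int.mod idx n + 1, PySem.Int.floordiv idx n + 1] := by
      rw [solution_alt, brkScanB_eq_brkFrom rest w 1 c' hc' hrest,
        show dupScanB (w :: rest) PySem.Set.empty 0
          = dupScanB rest (PySem.Set.add PySem.Set.empty w) 1 from rfl]
    rw [hL, hR, loopA_eq n rest 1 c' (PySem.Set.add PySem.Set.empty w) hrest]
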